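-- pv_equiv track=rewrite | github.com/Tsakalos/unified-fsdd-trainer | fsdd_trainer.py | max_hidden_under_budget_gru
-- ===== SOURCE A (Python) =====
-- LAYER_BUDGET_BYTES = 36 * 1024  # 36 kB
--
-- def max_hidden_under_budget_gru(D, bidirectional, bytes_per_param=4):
--     """Return max H s.t. GRU layer params ≤ 36kB; params per direction = 3H(D+H+2)."""
--     budget_params = LAYER_BUDGET_BYTES // int(bytes_per_param)
--     best = 1
--     for H in range(1, 1024):
--         per_dir = 3*H*(D + H + 2)
--         total = per_dir * (2 if bidirectional else 1)
--         if total <= budget_params: best = H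
--         else: break
--     return best
-- ===== SOURCE B (Python) =====
-- import math
--
-- LAYER_BUDGET_BYTES = 36 * 1024  # 36 kB
--
-- def max_hidden_under_budget_gru(D, bidirectional, bytes_per_param=4):
--     """Closed-form: solve 3c*H^2 + 3c*(D+2)*H <= budget in integers via isqrt."""
--     budget_params = LAYER_BUDGET_BYTES // int(bytes_per_param)
--     c = 2 if bidirectional else 1
--     if 3 * c * (D + 3) > budget_params:  # even H = 1 exceeds the budget
--         return 1
--     d = D + 2
--     q = budget_params // (3 * c)
--     disc = d * d + 4 * q  # nonnegative since H = 1 fits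
--     s = math.isqrt(disc)
--     return min((s - d) // 2, 1023)
-- ===== Notes on version B (the rewrite author's own statement) =====
-- stated objective: alternative
-- what changed: Replaced the linear scan over H=1..1023 by a closed-form integer solve of the quadratic budget inequality 3cH(H+D+2) <= budget using math.isqrt on the discriminant, clamped to [1,1023].
import Mathlib
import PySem

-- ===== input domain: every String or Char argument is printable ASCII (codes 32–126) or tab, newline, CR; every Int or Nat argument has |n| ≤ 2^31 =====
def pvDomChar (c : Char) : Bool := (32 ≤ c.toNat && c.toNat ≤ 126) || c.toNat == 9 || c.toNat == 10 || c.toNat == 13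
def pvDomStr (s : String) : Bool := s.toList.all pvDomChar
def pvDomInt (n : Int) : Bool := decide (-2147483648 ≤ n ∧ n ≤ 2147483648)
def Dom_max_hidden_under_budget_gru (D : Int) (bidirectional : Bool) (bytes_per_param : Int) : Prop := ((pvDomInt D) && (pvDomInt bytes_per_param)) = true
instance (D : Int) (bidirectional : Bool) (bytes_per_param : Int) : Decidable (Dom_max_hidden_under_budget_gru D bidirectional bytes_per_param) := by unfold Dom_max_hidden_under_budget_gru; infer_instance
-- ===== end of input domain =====

-- B replaces A's linear scan over H = 1..1023 by a closed-form integer solve of the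
-- quadratic budget inequality via math.isqrt (objective: alternative algorithm).

-- ===== PORT A =====
-- the for-loop with its early break, as structural recursion over the range list
def mhgLoopA (D : Int) (bidirectional : Bool) (budget_params : Int) : List Int → Int → Int
  | [], best => best
  | H :: rest, best =>
    let per_dir := 3*H*(D + H + 2)
    let total := per_dir * (if bidirectional then 2 else 1)
    if total ≤ budget_params then mhgLoopA D bidirectional budget_params rest H else best

def max_hidden_under_budget_gru (D : Int) (bidirectional : Bool) (bytes_per_param : Int) : Int :=
  let budget_params := PySem.Int.floordiv (36 * 1024) bytes_per_param
  mhgLoopA D bidirectional budget_params (PySem.List.pyRange 1 1024 1) 1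

-- ===== PORT B =====
def max_hidden_under_budget_gru_alt (D : Int) (bidirectional : Bool) (bytes_per_param : Int) : Int :=
  let budget_params := PySem.Int.floordiv (36 * 1024) bytes_per_param
  let c : Int := if bidirectional then 2 else 1
  if 3 * c * (D + 3) > budget_params then 1
  else
    let d := D + 2
    let q := PySem.Int.floordiv budget_params (3 * c)
    let disc := d * d + 4 * q
    -- math.isqrt; exact here since disc ≥ 0 in this branch (H = 1 fits the budget)
    let s : Int := (Nat.sqrt disc.toNat : Int)
    min (PySem.Int.floordiv (s - d) 2) 1023

-- ===== PRECONDITION & SPEC =====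
-- Pre_ excludes only bytes_per_param = 0, on which A raises ZeroDivisionError (B raises too).
def Pre_max_hidden_under_budget_gru (D : Int) (bidirectional : Bool) (bytes_per_param : Int) : Prop := bytes_per_param ≠ 0
instance (D : Int) (bidirectional : Bool) (bytes_per_param : Int) : Decidable (Pre_max_hidden_under_budget_gru D bidirectional bytes_per_param) := by unfold Pre_max_hidden_under_budget_gru; infer_instance
def pvWitness_max_hidden_under_budget_gru : Int × Bool × Int := (64, true, 4)

def Spec_max_hidden_under_budget_gru (D : Int) (bidirectional : Bool) (bytes_per_param : Int) (out : Int) : Prop := out = max_hidden_under_budget_gru_alt D bidirectional bytes_per_param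
instance (D : Int) (bidirectional : Bool) (bytes_per_param : Int) (out : Int) : Decidable (Spec_max_hidden_under_budget_gru D bidirectional bytes_per_param out) := by unfold Spec_max_hidden_under_budget_gru; infer_instance

-- ===== CLAIM (what is proved, stated in full; the proofs are below) =====
def Claim_equal_max_hidden_under_budget_gru : Prop := ∀ (D : Int) (bidirectional : Bool) (bytes_per_param : Int), Dom_max_hidden_under_budget_gru D bidirectional bytes_per_param → Pre_max_hidden_under_budget_gru D bidirectional bytes_per_param → Spec_max_hidden_under_budget_gru D bidirectional bytes_per_param (max_hidden_under_budget_gru D bidirectional bytes_per_param)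

-- ===== LEMMAS AND PROOFS =====

-- the loop computes "if the pred-interval reaches k then its right end (capped at 1023) else b"
lemma mhgLoopA_char (D : Int) (bid : Bool) (budget r0 : Int)
    (hch : ∀ H : Int, 1 ≤ H → (3*H*(D+H+2) * (if bid then 2 else 1) ≤ budget ↔ H ≤ r0)) :
    ∀ (n : Nat) (k b : Int), (1024 - k).toNat = n → 1 ≤ k →
      mhgLoopA D bid budget (PySem.List.pyRange k 1024 1) b =
        if k ≤ r0 ∧ k ≤ 1023 then min r0 1023 else b := by
  intro n
  induction n using Nat.strong_induction_on with
  | _ n ih =>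
    intro k b hn hk
    by_cases hk4 : (1024:Int) ≤ k
    · rw [PySem.List.pyRange_one_eq_nil hk4]
      have : ¬ (k ≤ r0 ∧ k ≤ 1023) := by omega
      simp [mhgLoopA, this]
    · push_neg at hk4
      rw [PySem.List.pyRange_one_cons (by omega)]
      by_cases hp : 3*k*(D+k+2) * (if bid then 2 else 1) ≤ budget
      · have hkr : k ≤ r0 := (hch k hk).mp hp
        have hrec := ih ((1024 - (k+1)).toNat) (by omega) (k+1) k rfl (by omega)
        simp only [mhgLoopA, if_pos hp, hrec]
        by_cases h2 : k + 1 ≤ r0 ∧ k + 1 ≤ 1023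
        · rw [if_pos h2, if_pos ⟨hkr, by omega⟩]
        · rw [if_neg h2, if_pos ⟨hkr, by omega⟩]
          omega
      · have hnr : ¬ k ≤ r0 := fun h => hp ((hch k hk).mpr h)
        simp only [mhgLoopA, if_neg hp]
        rw [if_neg (by tauto)]

-- ===== VERDICT (by name: the statement is the Claim_ definition above) =====

theorem max_hidden_under_budget_gru_spec : Claim_equal_max_hidden_under_budget_gru := by
  intro D bid bpp _ _
  unfold Spec_max_hidden_under_budget_gru max_hidden_under_budget_gru max_hidden_under_budget_gru_alt
  set budget := PySem.Int.floordiv (36 * 1024) bpp with hbudget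
  set c : Int := if bid then 2 else 1 with hc
  have hcpos : (0:Int) < 3 * c := by cases bid <;> simp [hc] <;> norm_num
  by_cases h1 : 3 * c * (D + 3) > budget
  · -- H = 1 already fails; loop returns the initial best = 1
    rw [PySem.List.pyRange_one_cons (by norm_num)]
    have hp : ¬ (3*(1:Int)*(D+1+2) * c ≤ budget) := by
      intro h; apply absurd h; push_neg; nlinarith
    simp only [mhgLoopA, hc] at hp ⊢
    rw [if_neg hp, if_pos h1]
  · push_neg at h1
    rw [if_neg (by omega)]
    set d := D + 2 with hd
    set q := PySem.Int.floordiv budget (3 * c) with hq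
    set disc := d * d + 4 * q with hdisc
    set s : Int := (Nat.sqrt disc.toNat : Int) with hs
    -- pred H ↔ H*H + d*H ≤ q
    have hpred : ∀ H : Int, 3*H*(D+H+2) * c ≤ budget ↔ H*H + d*H ≤ q := by
      intro H
      rw [hq, PySem.Int.le_floordiv_iff_mul_le hcpos]
      constructor <;> intro h <;> nlinarith
    have h1' : (1:Int) + d ≤ q := by
      have := (hpred 1).mp (by nlinarith)
      linarith
    have hdiscnn : (0:Int) ≤ disc := by nlinarith [sq_nonneg (d + 2), hdisc, h1']
    have hsnn : (0:Int) ≤ s := by positivity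
    have hsq : s * s ≤ disc := by
      have h : Nat.sqrt disc.toNat * Nat.sqrt disc.toNat ≤ disc.toNat := by
        have := Nat.sqrt_le' disc.toNat; simpa [pow_two] using this
      have : ((Nat.sqrt disc.toNat * Nat.sqrt disc.toNat : Nat) : Int) ≤ ((disc.toNat : Nat) : Int) := by
        exact_mod_cast h
      rwa [Int.toNat_of_nonneg hdiscnn, Nat.cast_mul] at this
    have hsq' : disc < (s + 1) * (s + 1) := by
      have h : disc.toNat < (Nat.sqrt disc.toNat + 1) * (Nat.sqrt disc.toNat + 1) := by
        have := Nat.lt_succ_sqrt' disc.toNat; simpa [pow_two, Nat.succ_eq_add_one] using this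
      have : ((disc.toNat : Nat) : Int) < ((Nat.sqrt disc.toNat + 1) * (Nat.sqrt disc.toNat + 1) : Nat) := by
        exact_mod_cast h
      rwa [Int.toNat_of_nonneg hdiscnn, Nat.cast_mul, Nat.cast_add, Nat.cast_one] at this
    set r0 := PySem.Int.floordiv (s - d) 2 with hr0
    have hr0le : ∀ H : Int, H ≤ r0 ↔ H * 2 ≤ s - d := by
      intro H; rw [hr0, PySem.Int.le_floordiv_iff_mul_le (by norm_num)]
    -- the characterization: for H ≥ 1, pred H ↔ H ≤ r0
    have hch : ∀ H : Int, 1 ≤ H → (3*H*(D+H+2) * c ≤ budget ↔ H ≤ r0) := by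
      intro H hH
      rw [hpred, hr0le]
      constructor
      · intro h
        have hsqH : (2*H + d) * (2*H + d) ≤ disc := by nlinarith
        by_cases hpos : 0 ≤ 2*H + d
        · nlinarith
        · linarith
      · intro h
        have hlow : -s ≤ 2 + d := by nlinarith
        have habs : (2*H + d) * (2*H + d) ≤ s * s := by nlinarith
        nlinarith
    have hr01 : (1:Int) ≤ r0 := (hch 1 (by norm_num)).mp (by nlinarith)
    have := mhgLoopA_char D bid budget r0 (by simpa [hc] using hch) (((1024:Int) - 1).toNat) 1 1 rfl (by norm_num)
    rw [this, if_pos ⟨hr01, by norm_num⟩]
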